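-- pv_equiv track=rewrite | github.com/angie-kong/csci355_summer25 | assignment09/assignment09.py | majority_logic_decoding
-- ===== SOURCE A (Python) =====
-- def majority_logic_decoding(bits, copies=3):
--     bb = chop_bits(bits, copies)
--     s = ""
--     for i in range(len(bb[0])):
--         n_1 = 0
--         n_0 = 0
--         for j in range(copies):
--             if bb[j][i] == "1":
--                 n_1 += 1
--             elif bb[j][i] == "0":
--                 n_0 += 1
--         if n_1 > n_0:
--             s += "1"
--         else:
--             s += "0"
--     return s
--
-- def chop_bits(bits, rows):
--     bb = []
--     n = len(bits) // rows
--     for i in range(rows):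
--         bb.append(bits[i * n:(i + 1) * n])
--     return bb
-- ===== SOURCE B (Python) =====
-- def majority_logic_decoding(bits, copies=3):
--     # One flat scan with per-column tallies instead of building row blocks.
--     n = len(bits) // copies
--     ones = [0] * n
--     zeros = [0] * n
--     for p in range(n * copies):
--         col = p % n
--         c = bits[p]
--         if c == "1":
--             ones[col] += 1
--         elif c == "0":
--             zeros[col] += 1
--     return "".join("1" if ones[i] > zeros[i] else "0" for i in range(n))
-- ===== Notes on version B (the rewrite author's own statement) =====
-- stated objective: alternative
-- what changed: Replaces the row-block construction (chop_bits slices) and the nested column-by-row scan with a single flat pass over the first n*copies characters maintaining per-column ones/zeros tally lists indexed by p % n, plus a final emit pass.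
import Mathlib
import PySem

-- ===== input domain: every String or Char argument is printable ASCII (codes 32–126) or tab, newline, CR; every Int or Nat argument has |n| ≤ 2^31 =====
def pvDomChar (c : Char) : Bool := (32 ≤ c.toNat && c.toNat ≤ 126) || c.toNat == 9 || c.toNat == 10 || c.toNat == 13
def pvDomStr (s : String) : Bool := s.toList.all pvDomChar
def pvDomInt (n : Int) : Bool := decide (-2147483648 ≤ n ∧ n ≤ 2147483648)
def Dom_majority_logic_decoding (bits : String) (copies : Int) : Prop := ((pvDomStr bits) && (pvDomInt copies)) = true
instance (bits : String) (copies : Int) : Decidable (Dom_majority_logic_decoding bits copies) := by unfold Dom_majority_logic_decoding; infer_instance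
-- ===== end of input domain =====

-- B replaces the row-block (chop_bits) construction and nested column-by-row scan with one
-- flat pass keeping per-column ones/zeros tallies (objective: alternative decomposition).

-- ===== PORT A =====
-- helper chop_bits of A; Python raises ZeroDivisionError for rows = 0 (excluded by Pre_)
def chop_bits (bits : String) (rows : Int) : List String :=
  let n := PySem.Int.floordiv (PySem.Str.len bits) rows
  (PySem.List.pyRange 0 rows 1).foldl
    (fun bb i => bb ++ [String.ofList (PySem.List.slice bits.toList (some (i * n)) (some ((i + 1) * n)))]) []

-- bb[0] raises IndexError when copies ≤ 0 (excluded by Pre_); inside Pre_ every index below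
-- is in range, so the pyGetD defaults ("" and ' ') are never used.
def majority_logic_decoding (bits : String) (copies : Int) : String :=
  let bb := chop_bits bits copies
  let s := (PySem.List.pyRange 0 (PySem.Str.len (PySem.List.pyGetD bb 0 "")) 1).foldl
    (fun (s : List Char) i =>
      let counts := (PySem.List.pyRange 0 copies 1).foldl
        (fun (c : Int × Int) j =>
          if PySem.List.pyGetD (PySem.List.pyGetD bb j "").toList i ' ' = '1' then (c.1 + 1, c.2)
          else if PySem.List.pyGetD (PySem.List.pyGetD bb j "").toList i ' ' = '0' then (c.1, c.2 + 1)
          else c) (0, 0)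
      if counts.1 > counts.2 then s ++ ['1'] else s ++ ['0']) []
  String.ofList s

-- ===== PORT B =====
-- inside Pre_ every index below is in range, so the pyGetD defaults are never used
def majority_logic_decoding_alt (bits : String) (copies : Int) : String :=
  let n := PySem.Int.floordiv (PySem.Str.len bits) copies
  let ones : List Int := List.replicate n.toNat 0
  let zeros : List Int := List.replicate n.toNat 0
  let oz := (PySem.List.pyRange 0 (n * copies) 1).foldl
    (fun (oz : List Int × List Int) p =>
      let col := PySem.Int.mod p n
      let c := PySem.List.pyGetD bits.toList p ' '
      if c = '1' then (PySem.List.pySetD oz.1 col (PySem.List.pyGetD oz.1 col 0 + 1), oz.2)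
      else if c = '0' then (oz.1, PySem.List.pySetD oz.2 col (PySem.List.pyGetD oz.2 col 0 + 1))
      else oz) (ones, zeros)
  String.ofList ((PySem.List.pyRange 0 n 1).map (fun i =>
    if PySem.List.pyGetD oz.1 i 0 > PySem.List.pyGetD oz.2 i 0 then '1' else '0'))

-- ===== PRECONDITION & SPEC =====
-- Pre_ excludes exactly copies ≤ 0, where Python A raises (ZeroDivisionError at copies = 0,
-- IndexError on bb[0] for copies < 0); A returns normally on every input with copies ≥ 1.
def Pre_majority_logic_decoding (bits : String) (copies : Int) : Prop := 1 ≤ copies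
instance (bits : String) (copies : Int) : Decidable (Pre_majority_logic_decoding bits copies) := by
  unfold Pre_majority_logic_decoding; infer_instance

def pvWitness_majority_logic_decoding : String × Int := ("110100101", 3)

def Spec_majority_logic_decoding (bits : String) (copies : Int) (out : String) : Prop :=
  out = majority_logic_decoding_alt bits copies
instance (bits : String) (copies : Int) (out : String) : Decidable (Spec_majority_logic_decoding bits copies out) := by
  unfold Spec_majority_logic_decoding; infer_instance

-- ===== CLAIM (what is proved, stated in full; the proofs are below) =====
def Claim_equal_majority_logic_decoding : Prop := ∀ (bits : String) (copies : Int), Dom_majority_logic_decoding bits copies → Pre_majority_logic_decoding bits copies → Spec_majority_logic_decoding bits copies (majority_logic_decoding bits copies)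


-- ===== LEMMAS AND PROOFS =====

-- count of '1'/'0' in column i among the first m flat positions (B's invariant quantity)
def pvCnt (cs : List Char) (n : ℕ) (ch : Char) (m i : ℕ) : ℕ :=
  (List.range m).countP (fun p => decide (p % n = i ∧ cs.getD p ' ' = ch))

-- count of '1'/'0' in column i over the c rows (the common closed form)
def pvColCnt (cs : List Char) (n c : ℕ) (ch : Char) (i : ℕ) : ℕ :=
  (List.range c).countP (fun j => decide (cs.getD (j * n + i) ' ' = ch))

def pvOut (cs : List Char) (n c : ℕ) : List Char :=
  (List.range n).map (fun i =>
    if ((pvColCnt cs n c '1' i : ℤ) > (pvColCnt cs n c '0' i : ℤ)) then '1' else '0')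

theorem pvGetDMap {α : Type} (n i : ℕ) (hi : i < n) (f : ℕ → α) (d : α) :
    ((List.range n).map f).getD i d = f i := by
  simp [List.getD_eq_getElem?_getD, List.getElem?_range hi]

theorem pvSetMap {α : Type} (n col : ℕ) (hcol : col < n) (f : ℕ → α) (v : α) :
    ((List.range n).map f).set col v = (List.range n).map (fun i => if i = col then v else f i) := by
  apply List.ext_getElem
  · simp
  · intro i h1 h2
    simp only [List.getElem_set, List.getElem_map, List.getElem_range]
    by_cases h : i = col
    · subst h; simp
    · simp only [h, if_false, if_neg (fun hh : col = i => h hh.symm)]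

theorem pvRowGet (cs : List Char) (n a i : ℕ) (hi : i < n) :
    ((cs.drop a).take n).getD i ' ' = cs.getD (a + i) ' ' := by
  simp [List.getD_eq_getElem?_getD, List.getElem?_take_of_lt hi, List.getElem?_drop]

theorem pvChop (bits : String) (c : ℕ) :
    chop_bits bits (c : Int) =
      (List.range c).map (fun j =>
        String.ofList ((bits.toList.drop (j * (bits.toList.length / c))).take (bits.toList.length / c))) := by
  unfold chop_bits
  simp only [PySem.Str.len_eq, PySem.Int.floordiv_natCast, PySem.List.pyRange_one,
    List.foldl_map, PySem.List.foldl_append_singleton_eq_map, List.nil_append,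
    sub_zero, Int.toNat_natCast, zero_add]
  refine List.map_congr_left ?_
  intro k hk
  have e1 : (k : ℤ) * ((bits.toList.length / c : ℕ) : ℤ) = ((k * (bits.toList.length / c) : ℕ) : ℤ) := by
    push_cast; ring
  have e2 : ((k : ℤ) + 1) * ((bits.toList.length / c : ℕ) : ℤ)
      = (((k + 1) * (bits.toList.length / c) : ℕ) : ℤ) := by push_cast; ring
  rw [e1, e2, PySem.List.slice_natCast]
  have e3 : (k + 1) * (bits.toList.length / c) - k * (bits.toList.length / c)
      = bits.toList.length / c := by rw [Nat.succ_mul, Nat.add_sub_cancel_left]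
  rw [e3]

theorem pvPairCount (l : List ℤ) (f : ℤ → Char) (a b : ℤ) :
    l.foldl (fun c j =>
        if f j = '1' then (c.1 + 1, c.2)
        else if f j = '0' then (c.1, c.2 + 1)
        else c) (a, b)
      = (a + (l.countP (fun j => decide (f j = '1')) : ℤ),
         b + (l.countP (fun j => decide (f j = '0')) : ℤ)) := by
  induction l generalizing a b with
  | nil => simp
  | cons x l ih =>
    simp only [List.foldl_cons, List.countP_cons]
    by_cases h1 : f x = '1'
    · have h0 : ¬ f x = '0' := by simp [h1]
      rw [if_pos h1, ih]
      simp only [h1]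
      refine Prod.ext ?_ ?_ <;> simp <;> omega
    · by_cases h0 : f x = '0'
      · rw [if_neg h1, if_pos h0, ih]
        simp only [h0]
        refine Prod.ext ?_ ?_ <;> simp <;> omega
      · rw [if_neg h1, if_neg h0, ih]
        simp [h1, h0]

theorem pvCountSingle (n i : ℕ) (hi : i < n) (Q : ℕ → Prop) [DecidablePred Q] :
    (List.range n).countP (fun r => decide (r = i ∧ Q r)) = if Q i then 1 else 0 := by
  by_cases hQ : Q i
  · rw [if_pos hQ]
    rw [List.countP_congr (fun r _ => by
      by_cases hr : r = i <;> simp [hr, hQ] :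
      ∀ r ∈ List.range n, (decide (r = i ∧ Q r)) = true ↔ (r == i) = true)]
    have : (List.range n).countP (fun r => r == i) = (List.range n).count i := by
      simp [List.count]
    rw [this, List.count_eq_one_of_mem (List.nodup_range) (List.mem_range.mpr hi)]
  · rw [if_neg hQ]
    rw [List.countP_eq_zero.mpr]
    intro r _ hr
    rcases of_decide_eq_true hr with ⟨rfl, hq⟩
    exact hQ hq

theorem pvCross (cs : List Char) (n c i : ℕ) (hi : i < n) (ch : Char) :
    pvCnt cs n ch (n * c) i = pvColCnt cs n c ch i := by
  induction c with
  | zero => simp [pvCnt, pvColCnt]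
  | succ c ih =>
    unfold pvCnt pvColCnt at *
    rw [Nat.mul_succ, List.range_add, List.countP_append, ih, List.range_succ,
      List.countP_append, List.countP_map]
    congr 1
    rw [List.countP_congr (fun r hr => by
      have hrn : r < n := List.mem_range.mp hr
      have hmod : (n * c + r) % n = r := by
        rw [Nat.mul_comm, Nat.add_comm, Nat.add_mul_mod_self_right, Nat.mod_eq_of_lt hrn]
      simp [Function.comp, hmod] :
      ∀ r ∈ List.range n,
        ((fun p => decide (p % n = i ∧ cs.getD p ' ' = ch)) ∘ (fun r => n * c + r)) r = true ↔
        (decide (r = i ∧ cs.getD (n * c + r) ' ' = ch)) = true)]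
    rw [pvCountSingle n i hi (fun r => cs.getD (n * c + r) ' ' = ch)]
    have : n * c + i = c * n + i := by ring
    simp [this, List.countP_cons]


theorem pvCntSucc (cs : List Char) (n : ℕ) (ch : Char) (m i : ℕ) :
    pvCnt cs n ch (m + 1) i
      = pvCnt cs n ch m i + if (m % n = i ∧ cs.getD m ' ' = ch) then 1 else 0 := by
  unfold pvCnt
  rw [List.range_succ, List.countP_append]
  simp [List.countP_cons]

theorem pvMapSuccMiss (cs : List Char) (n : ℕ) (ch : Char) (m : ℕ)
    (hch : ¬ cs.getD m ' ' = ch) :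
    (List.range n).map (fun i => (pvCnt cs n ch (m + 1) i : ℤ))
      = (List.range n).map (fun i => (pvCnt cs n ch m i : ℤ)) := by
  refine List.map_congr_left ?_
  intro i _
  rw [pvCntSucc]
  have hch' : ¬ cs[m]?.getD ' ' = ch := by simpa [List.getD_eq_getElem?_getD] using hch
  simp [hch']

theorem pvMapSuccHit (cs : List Char) (n : ℕ) (ch : Char) (m : ℕ) (hn : 0 < n)
    (hch : cs.getD m ' ' = ch) :
    ((List.range n).map (fun i => (pvCnt cs n ch m i : ℤ))).set (m % n)
        ((pvCnt cs n ch m (m % n) : ℤ) + 1)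
      = (List.range n).map (fun i => (pvCnt cs n ch (m + 1) i : ℤ)) := by
  rw [pvSetMap n (m % n) (Nat.mod_lt _ hn)]
  refine List.map_congr_left ?_
  intro i _
  rw [pvCntSucc]
  by_cases h : i = m % n
  · subst h
    have hc : m % n = m % n ∧ cs.getD m ' ' = ch := ⟨rfl, hch⟩
    rw [if_pos hc]
    push_cast
    simp

  · have hc : ¬ (m % n = i ∧ cs.getD m ' ' = ch) := fun hc => h hc.1.symm
    rw [if_neg hc]
    simp only [add_zero, if_neg h]

theorem pvBinv (cs : List Char) (n : ℕ) (hn : 0 < n) (m : ℕ) :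
    (PySem.List.pyRange 0 (m : Int) 1).foldl
      (fun (oz : List ℤ × List ℤ) p =>
        if PySem.List.pyGetD cs p ' ' = '1' then
          (PySem.List.pySetD oz.1 (PySem.Int.mod p (n : Int)) (PySem.List.pyGetD oz.1 (PySem.Int.mod p (n : Int)) 0 + 1), oz.2)
        else if PySem.List.pyGetD cs p ' ' = '0' then
          (oz.1, PySem.List.pySetD oz.2 (PySem.Int.mod p (n : Int)) (PySem.List.pyGetD oz.2 (PySem.Int.mod p (n : Int)) 0 + 1))
        else oz)
      (List.replicate n 0, List.replicate n 0)
    = ((List.range n).map (fun i => (pvCnt cs n '1' m i : ℤ)),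
       (List.range n).map (fun i => (pvCnt cs n '0' m i : ℤ))) := by
  induction m with
  | zero =>
    have h0 : PySem.List.pyRange 0 ((0 : ℕ) : Int) 1 = [] := by decide
    simp [pvCnt, List.map_const']
  | succ m ih =>
    have hcast : (((m + 1 : ℕ)) : ℤ) = ((m : ℕ) : ℤ) + 1 := by push_cast; ring
    rw [hcast, PySem.List.pyRange_one_succ_right (by positivity), List.foldl_append, ih,
      List.foldl_cons, List.foldl_nil]
    simp only [PySem.List.pyGetD_natCast, PySem.Int.mod_natCast, PySem.List.pySetD_natCast]
    by_cases h1 : cs.getD m ' ' = '1'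
    · rw [if_pos h1]
      refine Prod.ext ?_ ?_
      · simp only []
        rw [pvGetDMap n (m % n) (Nat.mod_lt _ hn)]
        rw [pvMapSuccHit cs n '1' m hn h1]
      · simp only []
        rw [pvMapSuccMiss cs n '0' m (by rw [List.getD_eq_getElem?_getD] at h1; simp [h1])]
    · rw [if_neg h1]
      by_cases h0 : cs.getD m ' ' = '0'
      · rw [if_pos h0]
        refine Prod.ext ?_ ?_
        · simp only []
          rw [pvMapSuccMiss cs n '1' m h1]
        · simp only []
          rw [pvGetDMap n (m % n) (Nat.mod_lt _ hn)]
          rw [pvMapSuccHit cs n '0' m hn h0]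
      · rw [if_neg h0]
        refine Prod.ext ?_ ?_
        · simp only []
          rw [pvMapSuccMiss cs n '1' m h1]
        · simp only []
          rw [pvMapSuccMiss cs n '0' m h0]

theorem pvAfold (l : List ℤ) (f : ℤ → ℤ × ℤ) (acc : List Char) :
    l.foldl (fun s i => if (f i).1 > (f i).2 then s ++ ['1'] else s ++ ['0']) acc
      = acc ++ l.map (fun i => if (f i).1 > (f i).2 then '1' else '0') := by
  induction l generalizing acc with
  | nil => simp
  | cons x l ih =>
    simp only [List.foldl_cons, List.map_cons]
    by_cases h : (f x).1 > (f x).2 <;> simp [h, ih]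

theorem pvA (bits : String) (c : ℕ) (hc : 1 ≤ c) :
    majority_logic_decoding bits (c : Int) =
      String.ofList (pvOut bits.toList (bits.toList.length / c) c) := by
  unfold majority_logic_decoding
  rw [pvChop]
  dsimp only
  have hrow0 : PySem.List.pyGetD ((List.range c).map (fun j =>
      String.ofList ((bits.toList.drop (j * (bits.toList.length / c))).take
        (bits.toList.length / c)))) 0 ""
      = String.ofList (bits.toList.take (bits.toList.length / c)) := by
    rw [PySem.List.pyGetD_zero, pvGetDMap c 0 hc]
    simp
  rw [hrow0]
  have hlen : PySem.Str.len (String.ofList (bits.toList.take (bits.toList.length / c)))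
      = ((bits.toList.length / c : ℕ) : ℤ) := by
    simp [PySem.Str.len_eq, Nat.div_le_self]
  rw [hlen]
  rw [pvAfold _ (fun i =>
    (PySem.List.pyRange 0 (c : Int) 1).foldl
      (fun (cc : ℤ × ℤ) j =>
        if PySem.List.pyGetD (PySem.List.pyGetD ((List.range c).map (fun j =>
              String.ofList ((bits.toList.drop (j * (bits.toList.length / c))).take
                (bits.toList.length / c)))) j "").toList i ' ' = '1' then (cc.1 + 1, cc.2)
        else if PySem.List.pyGetD (PySem.List.pyGetD ((List.range c).map (fun j =>
              String.ofList ((bits.toList.drop (j * (bits.toList.length / c))).take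
                (bits.toList.length / c)))) j "").toList i ' ' = '0' then (cc.1, cc.2 + 1)
        else cc) (0, 0)) []]
  rw [List.nil_append]
  simp only [PySem.List.pyRange_one, sub_zero, Int.toNat_natCast, List.map_map, zero_add]
  unfold pvOut
  refine congrArg _ (List.map_congr_left ?_)
  intro i hi
  have hi' : i < bits.toList.length / c := List.mem_range.mp hi
  simp only [Function.comp_apply]
  rw [pvPairCount]
  simp only [List.countP_map, zero_add]
  have hrew : ∀ ch : Char, (List.range c).countP ((fun j => decide
        (PySem.List.pyGetD (PySem.List.pyGetD ((List.range c).map (fun j =>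
          String.ofList ((bits.toList.drop (j * (bits.toList.length / c))).take
            (bits.toList.length / c)))) j "").toList ↑i ' ' = ch)) ∘ (fun k : ℕ => ((k : ℤ))))
      = pvColCnt bits.toList (bits.toList.length / c) c ch i := by
    intro ch
    unfold pvColCnt
    refine List.countP_congr ?_
    intro j hj
    have hj' : j < c := List.mem_range.mp hj
    simp only [Function.comp_apply, PySem.List.pyGetD_natCast]
    rw [pvGetDMap c j hj']
    simp only [String.toList_ofList]
    rw [pvRowGet bits.toList (bits.toList.length / c) (j * (bits.toList.length / c)) i hi']
  rw [hrew '1', hrew '0']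

theorem pvB (bits : String) (c : ℕ) :
    majority_logic_decoding_alt bits (c : Int) =
      String.ofList (pvOut bits.toList (bits.toList.length / c) c) := by
  unfold majority_logic_decoding_alt
  dsimp only
  simp only [PySem.Str.len_eq, PySem.Int.floordiv_natCast, Int.toNat_natCast]
  by_cases hn : bits.toList.length / c = 0
  · rw [hn]
    have h0 : PySem.List.pyRange 0 ((0 : ℕ) : Int) 1 = [] := by decide
    simp [pvOut]
  · have hn' : 0 < bits.toList.length / c := Nat.pos_of_ne_zero hn
    have hcast : ((bits.toList.length / c : ℕ) : ℤ) * ((c : ℕ) : ℤ)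
        = (((bits.toList.length / c) * c : ℕ) : ℤ) := by push_cast; ring
    rw [hcast, pvBinv bits.toList (bits.toList.length / c) hn' ((bits.toList.length / c) * c)]
    rw [PySem.List.pyRange_one]
    unfold pvOut
    simp only [sub_zero, Int.toNat_natCast, List.map_map]
    refine congrArg _ (List.map_congr_left ?_)
    intro i hi
    have hi' : i < bits.toList.length / c := List.mem_range.mp hi
    simp only [Function.comp_apply, zero_add, PySem.List.pyGetD_natCast]
    rw [pvGetDMap (bits.toList.length / c) i hi', pvGetDMap (bits.toList.length / c) i hi']
    rw [pvCross bits.toList _ c i hi' '1', pvCross bits.toList _ c i hi' '0']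

-- ===== VERDICT (by name: the statement is the Claim_ definition above) =====
theorem majority_logic_decoding_spec : Claim_equal_majority_logic_decoding := by
  intro bits copies _ hpre
  unfold Spec_majority_logic_decoding
  obtain ⟨c, rfl⟩ : ∃ c : ℕ, copies = (c : Int) :=
    ⟨copies.toNat, (Int.toNat_of_nonneg (by exact le_trans Int.one_nonneg hpre)).symm⟩
  have hc : 1 ≤ c := by unfold Pre_majority_logic_decoding at hpre; exact_mod_cast hpre
  rw [pvA bits c hc, pvB bits c]
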